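-- pv_equiv track=rewrite | github.com/Ame-ReIori/addition_chain | addnumList.py | getAddnumList
-- ===== SOURCE A (Python) =====
-- def getAddnumList(n,addnumBound):
--
--     addnumList = []
--     ns = bin(n)[2:]
--     ones = ns.split('0')
--     oneMax = 0
--     for one in ones:
--         if(len(one)>oneMax):
--             oneMax = len(one)
--     if(oneMax > (len(ns)//2)):
--         oneMax = len(ns)//2
--     addnumMax = 2 ** oneMax
--
--     if(addnumMax > addnumBound):
--         addnumMax = addnumBound
--
--     for addnum in range(1,addnumMax,2):
--         addnumList.append(addnum)
--
--     return addnumList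
-- ===== SOURCE B (Python) =====
-- def getAddnumList(n, addnumBound):
--     ns = bin(n)[2:]
--     cur = 0
--     oneMax = 0
--     for c in ns:
--         cur = 0 if c == '0' else cur + 1
--         if cur > oneMax:
--             oneMax = cur
--     oneMax = min(oneMax, len(ns) // 2)
--     addnumMax = min(2 ** oneMax, addnumBound)
--     return list(range(1, addnumMax, 2))
-- ===== Notes on version B (the rewrite author's own statement) =====
-- stated objective: simpler
-- what changed: Replaces the split-on-'0' list construction plus a separate max-length loop by a single streaming scan of the binary string maintaining a current-run counter, and replaces the two if-capping branches by min().
import Mathlib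
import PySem

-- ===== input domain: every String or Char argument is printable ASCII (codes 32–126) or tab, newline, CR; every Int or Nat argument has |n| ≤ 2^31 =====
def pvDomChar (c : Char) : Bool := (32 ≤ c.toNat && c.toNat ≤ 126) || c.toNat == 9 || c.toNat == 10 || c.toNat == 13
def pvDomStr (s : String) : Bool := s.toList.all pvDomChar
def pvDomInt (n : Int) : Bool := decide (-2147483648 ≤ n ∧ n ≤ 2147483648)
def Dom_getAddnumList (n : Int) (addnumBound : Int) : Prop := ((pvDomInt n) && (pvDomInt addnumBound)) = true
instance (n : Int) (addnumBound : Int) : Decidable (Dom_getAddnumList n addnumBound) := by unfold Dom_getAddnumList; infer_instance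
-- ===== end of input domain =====

-- B replaces A's split('0')-then-max pass by one streaming longest-run scan (simpler decomposition); same results.


-- ===== PORT A =====
-- Python's bin() is not in PySem; ported by hand, exact on all Int:
-- binCore m = binary digits of m (msb first, no leading zeros), empty for 0
def binCore : Nat → List Char
  | 0 => []
  | m+1 => binCore ((m+1)/2) ++ [if (m+1) % 2 = 1 then '1' else '0']
decreasing_by exact Nat.div_lt_self (Nat.succ_pos m) (by norm_num)

-- bin(n) as a list of chars: '-0b…' for n<0, '0b0' for 0, '0b…' otherwise (exact port of Python's bin)
def pyBin (n : Int) : List Char :=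
  if n < 0 then '-' :: '0' :: 'b' :: binCore n.natAbs
  else if n = 0 then ['0', 'b', '0']
  else '0' :: 'b' :: binCore n.natAbs

-- ns.split('0') ported by hand, exact: Python str.split with a one-char separator
def splitZ : List Char → List (List Char)
  | [] => [[]]
  | c :: rest =>
    if c = '0' then [] :: splitZ rest
    else
      match splitZ rest with
      | [] => [[c]]        -- unreachable: splitZ never returns []
      | s :: ss => (c :: s) :: ss

def getAddnumList (n : Int) (addnumBound : Int) : List Int :=
  let ns := (pyBin n).drop 2                      -- ns = bin(n)[2:]
  let ones := splitZ ns                           -- ones = ns.split('0')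
  let oneMax := ones.foldl (fun acc one => if one.length > acc then one.length else acc) 0
  let oneMax := if oneMax > ns.length / 2 then ns.length / 2 else oneMax
  let addnumMax : Int := 2 ^ oneMax
  let addnumMax := if addnumMax > addnumBound then addnumBound else addnumMax
  PySem.List.pyRange 1 addnumMax 2                -- the append loop over range(1, addnumMax, 2)

-- ===== PORT B =====
def getAddnumList_alt (n : Int) (addnumBound : Int) : List Int :=
  let ns := (pyBin n).drop 2                      -- ns = bin(n)[2:]
  let st := ns.foldl (fun (p : Nat × Nat) c =>    -- streaming scan: (cur, oneMax)
      let cur := if c = '0' then 0 else p.1 + 1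
      (cur, if cur > p.2 then cur else p.2)) (0, 0)
  let oneMax := min st.2 (ns.length / 2)
  let addnumMax := min ((2 : Int) ^ oneMax) addnumBound
  PySem.List.pyRange 1 addnumMax 2

-- ===== PRECONDITION & SPEC =====
def Spec_getAddnumList (n : Int) (addnumBound : Int) (out : List Int) : Prop := out = getAddnumList_alt n addnumBound
instance (n : Int) (addnumBound : Int) (out : List Int) : Decidable (Spec_getAddnumList n addnumBound out) := by unfold Spec_getAddnumList; infer_instance

-- ===== CLAIM (what is proved, stated in full; the proofs are below) =====
def Claim_equal_getAddnumList : Prop := ∀ (n : Int) (addnumBound : Int), Dom_getAddnumList n addnumBound → Spec_getAddnumList n addnumBound (getAddnumList n addnumBound)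

-- ===== LEMMAS AND PROOFS =====

-- the streaming-fold step function of port B, written out
def stepB (p : Nat × Nat) (c : Char) : Nat × Nat :=
  let cur := if c = '0' then 0 else p.1 + 1
  (cur, if cur > p.2 then cur else p.2)

-- A's max-accumulating step over segments
def stepA (acc : Nat) (one : List Char) : Nat := if one.length > acc then one.length else acc

-- reference: longest run of non-'0' chars, the current run having length cur so far
def segMax (cur : Nat) : List Char → Nat
  | [] => cur
  | c :: rest => if c = '0' then max cur (segMax 0 rest) else segMax (cur + 1) rest

lemma le_segMax (ns : List Char) : ∀ cur, cur ≤ segMax cur ns := by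
  induction ns with
  | nil => intro cur; simp [segMax]
  | cons c rest ih =>
    intro cur
    by_cases h : c = '0'
    · simp only [segMax, if_pos h]; exact Nat.le_max_left _ _
    · simp only [segMax, if_neg h]; exact le_trans (Nat.le_succ cur) (ih (cur + 1))

lemma foldB_eq_segMax (ns : List Char) : ∀ cur m, cur ≤ m →
    (ns.foldl stepB (cur, m)).2 = max m (segMax cur ns) := by
  induction ns with
  | nil => intro cur m h; simp [segMax]; omega
  | cons c rest ih =>
    intro cur m h
    rw [List.foldl_cons]
    by_cases hc : c = '0'
    · subst hc
      rw [show stepB (cur, m) '0' = (0, m) from by simp [stepB]]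
      rw [ih 0 m (Nat.zero_le m)]
      simp [segMax]
      omega
    · rw [show stepB (cur, m) c = (cur + 1, if cur + 1 > m then cur + 1 else m) from by
        simp [stepB, hc]]
      rw [ih (cur + 1) _ (by split_ifs <;> omega)]
      have := le_segMax rest (cur + 1)
      simp only [segMax, if_neg hc]
      split_ifs <;> omega

lemma splitZ_ne_nil (ns : List Char) : splitZ ns ≠ [] := by
  cases ns with
  | nil => simp [splitZ]
  | cons c rest =>
    by_cases h : c = '0'
    · simp only [splitZ, if_pos h]; exact List.cons_ne_nil _ _
    · simp only [splitZ, if_neg h]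
      cases splitZ rest <;> simp

lemma stepA_zero (x : List Char) : stepA 0 x = x.length := by
  simp only [stepA]; split_ifs <;> omega

lemma foldA_max (l : List (List Char)) : ∀ acc,
    l.foldl stepA acc = max acc (l.foldl stepA 0) := by
  induction l with
  | nil => intro acc; simp
  | cons x l ih =>
    intro acc
    simp only [List.foldl_cons]
    rw [ih (stepA acc x), ih (stepA 0 x)]
    simp only [stepA]
    split_ifs <;> omega

lemma segMax_splitZ (ns : List Char) : ∀ s ss cur, splitZ ns = s :: ss →
    segMax cur ns = max (cur + s.length) (ss.foldl stepA 0) := by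
  induction ns with
  | nil =>
    intro s ss cur h
    simp only [splitZ] at h
    obtain ⟨rfl, rfl⟩ := by exact List.cons.inj h
    simp [segMax]
  | cons c rest ih =>
    intro s ss cur h
    by_cases hc : c = '0'
    · subst hc
      rw [show splitZ ('0' :: rest) = [] :: splitZ rest from by simp [splitZ]] at h
      obtain ⟨rfl, h2⟩ := List.cons.inj h
      cases hs : splitZ rest with
      | nil => exact absurd hs (splitZ_ne_nil rest)
      | cons s' ss' =>
        rw [hs] at h2; subst h2
        rw [show segMax cur ('0' :: rest) = max cur (segMax 0 rest) from by simp [segMax]]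
        rw [ih s' ss' 0 hs]
        rw [List.foldl_cons, foldA_max ss' (stepA 0 s'), stepA_zero]
        simp only [List.length_nil]
        omega
    · cases hs : splitZ rest with
      | nil => exact absurd hs (splitZ_ne_nil rest)
      | cons s' ss' =>
        rw [show splitZ (c :: rest) = (c :: s') :: ss' from by simp [splitZ, hc, hs]] at h
        obtain ⟨rfl, rfl⟩ := List.cons.inj h
        rw [show segMax cur (c :: rest) = segMax (cur + 1) rest from by simp [segMax, hc]]
        rw [ih s' ss' (cur + 1) hs]
        simp only [List.length_cons]
        omega

-- the two oneMax computations coincide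
lemma oneMax_eq (ns : List Char) :
    (splitZ ns).foldl stepA 0 = (ns.foldl stepB (0, 0)).2 := by
  rw [foldB_eq_segMax ns 0 0 le_rfl]
  cases hs : splitZ ns with
  | nil => exact absurd hs (splitZ_ne_nil ns)
  | cons s ss =>
    rw [segMax_splitZ ns s ss 0 hs]
    rw [List.foldl_cons, foldA_max ss (stepA 0 s), stepA_zero]
    omega

-- ===== VERDICT (by name: the statement is the Claim_ definition above) =====
theorem getAddnumList_spec : Claim_equal_getAddnumList := by
  intro n addnumBound _
  show getAddnumList n addnumBound = getAddnumList_alt n addnumBound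
  simp only [getAddnumList, getAddnumList_alt]
  rw [show (fun acc (one : List Char) => if one.length > acc then one.length else acc) = stepA
      from by funext acc one; simp [stepA]]
  rw [show (fun (p : Nat × Nat) c =>
      let cur := if c = '0' then 0 else p.1 + 1
      (cur, if cur > p.2 then cur else p.2)) = stepB from by funext p c; simp [stepB]]
  rw [oneMax_eq]
  set ns := (pyBin n).drop 2
  set o := (ns.foldl stepB (0, 0)).2
  rw [show (if o > ns.length / 2 then ns.length / 2 else o) = min o (ns.length / 2) from by
    split_ifs <;> omega]
  rw [show ∀ x : Int, (if x > addnumBound then addnumBound else x) = min x addnumBound from by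
    intro x; split_ifs <;> omega]
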